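-- pv_equiv track=rewrite | github.com/ManduTheCat/elice_algorithm_deepening_study | week3/2468안전영역/solution.py | count_map
-- ===== SOURCE A (Python) =====
-- from collections import deque
--
-- def make_safe_map(input_map, rain_h):
--     """
--      낮은 지대라면 True 높은 지대라면 false 로 이루어진 map 을 반환한는 함수
--     """
--     len_n = len(input_map)
--     safe_map = [[False for _ in range(len_n)] for _ in range(len_n)]
--     for row in range(len_n):
--         for col in range(len_n):
--             if input_map[row][col] <= rain_h:
--                 safe_map[row][col] = True
--             else: safe_map[row][col] = False
--     return safe_map
--
-- def count_map(input_map, rain_h):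
--     """
--     안전지역 갯수를 세는 함수
--     새로운 bfs 를 진입하면 새로운 덩어리임을 활용
--     safe_map 에는 위치별로  높이에 따른 안전지대면 false 물에잠기면 true 가 있다.
--     """
--     safe_map = make_safe_map(input_map, rain_h)
--     count = 0
--     for i, row in enumerate(safe_map):
--         for j, val in enumerate(row):
--             if val is False:
--                 count += 1
--                 bfs(safe_map, i, j)
--     return count
--
-- def bfs(safe_map, i, j):
--     """
--     bfs 를 체크 해서 safe_map 인접한 칸 들을 방문한다
--     매개변수로 사용된 safe_map 은 deep copy 를 하지 않았기에 bfs 에서 true 로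
--     체크가되면 호출된 count_map() 에서의 safe_map 변수 에도 반영된다.
--     """
--     d_x = [1, -1, 0, 0]
--     d_y = [0, 0, 1, -1]
--     queue = deque()
--     queue.append([i, j])
--
--     while queue:
--         cur_node = queue.popleft()
--         for itor, _ in enumerate(d_x):
--             try:
--                 next_node = [cur_node[0] + d_x[itor], cur_node[1] + d_y[itor]]
--                 next_node_value = safe_map[next_node[0]][next_node[1]]
--                 if (next_node[0] != -1) and (next_node[1] != -1) and next_node_value is False:
--                     safe_map[next_node[0]][next_node[1]] = True
--                     queue.append([next_node[0], next_node[1]])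
--             except IndexError:
--                 continue
-- ===== SOURCE B (Python) =====
-- def count_map(input_map, rain_h):
--     """Union-by-relabel over grid edges (no search / flood fill): give every
--     high cell its own label, then for each right/down edge between two high
--     cells merge the two label classes; the answer is the number of distinct
--     labels left."""
--     n = len(input_map)
--     high = [(i, j) for i in range(n) for j in range(n) if input_map[i][j] > rain_h]
--     label = {p: p for p in high}
--     for (i, j) in high:
--         for q in ((i, j + 1), (i + 1, j)):
--             if q in label:
--                 r1, r2 = label[(i, j)], label[q]
--                 if r1 != r2:
--                     for p in high:
--                         if label[p] == r2:
--                             label[p] = r1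
--     return len(set(label.values()))
-- ===== Notes on version B (the rewrite author's own statement) =====
-- stated objective: alternative
-- what changed: Replaces A's scan-and-flood-fill (BFS with a deque mutating a boolean safe_map, try/except bounds handling) by a searchless union/merge algorithm: every high cell gets its own label in a dict, each right/down edge between two high cells merges the two label classes by relabeling, and the answer is the number of distinct final labels.
-- outside the precondition, e.g. on count_map([[1, 2], [3]], 0): A raises IndexError, B raises IndexError
import Mathlib
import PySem

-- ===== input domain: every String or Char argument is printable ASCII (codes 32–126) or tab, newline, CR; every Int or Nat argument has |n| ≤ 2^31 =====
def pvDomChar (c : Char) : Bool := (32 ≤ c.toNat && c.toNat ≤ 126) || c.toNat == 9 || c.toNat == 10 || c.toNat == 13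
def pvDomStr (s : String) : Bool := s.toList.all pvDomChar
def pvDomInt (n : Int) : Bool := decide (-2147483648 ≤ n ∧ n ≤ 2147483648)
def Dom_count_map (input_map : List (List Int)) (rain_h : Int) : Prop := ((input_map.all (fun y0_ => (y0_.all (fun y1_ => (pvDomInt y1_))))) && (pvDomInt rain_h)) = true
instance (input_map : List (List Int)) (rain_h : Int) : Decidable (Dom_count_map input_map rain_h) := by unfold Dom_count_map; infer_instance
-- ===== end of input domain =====

-- B replaces A's scan + BFS flood fill (deque, mutated boolean safe_map, try/except
-- bounds) by a searchless union/merge algorithm: label every high cell with itself,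
-- merge label classes along right/down edges, count distinct labels (alternative).
-- Pre_ excludes ragged inputs (a row shorter than the row count) on which A raises IndexError.


-- ===== PORT A =====
-- input_map[i][j] (two pyGet?); the .getD 0 is never taken on inputs admitted by Pre_
def pvGetI (m : List (List Int)) (i j : Int) : Int :=
  (((PySem.List.pyGet? m i).bind (fun r => PySem.List.pyGet? r j)).getD 0)

-- A's make_safe_map: n×n grid, True = flooded (value ≤ rain_h)
def make_safe_map (input_map : List (List Int)) (rain_h : Int) : List (List Bool) :=
  (PySem.List.pyRange 0 (input_map.length : Int) 1).map (fun row =>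
    (PySem.List.pyRange 0 (input_map.length : Int) 1).map (fun col =>
      decide (pvGetI input_map row col ≤ rain_h)))

-- safe_map[a][b] read (IndexError = none), exactly Python's negative-index rule
def pvGetB (g : List (List Bool)) (a b : Int) : Option Bool :=
  (PySem.List.pyGet? g a).bind (fun row => PySem.List.pyGet? row b)

-- safe_map[a][b] = True, with Python's index semantics (pySetD)
def pvSetB (g : List (List Bool)) (a b : Int) : List (List Bool) :=
  PySem.List.pySetD g a (PySem.List.pySetD (PySem.List.pyGetD g a []) b true)

-- number of False cells (termination measure for the bfs while-loop)
def pvFalseCount (g : List (List Bool)) : Nat :=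
  (g.map (fun r => r.countP (fun x => x == false))).sum

-- one direction of A's inner for-loop: try to read, continue on IndexError,
-- guard `!= -1`, mark and enqueue if the cell is False
def bfsDir (g : List (List Bool)) (a b : Int) : List (List Bool) × List (Int × Int) :=
  match pvGetB g a b with
  | none => (g, [])
  | some v => if a ≠ -1 ∧ b ≠ -1 ∧ v = false then (pvSetB g a b, [(a, b)]) else (g, [])

lemma pvCountP_set_true (r : List Bool) (k : Nat) (hk : r[k]? = some false) :
    (r.set k true).countP (fun x => x == false) + 1 = r.countP (fun x => x == false) := by
  induction r generalizing k with
  | nil => simp at hk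
  | cons x xs ih =>
    cases k with
    | zero => simp_all
    | succ k =>
      simp only [List.getElem?_cons_succ] at hk
      simp only [List.set_cons_succ, List.countP_cons]
      have := ih k hk
      omega

lemma pvFalseCount_set (g : List (List Bool)) (k : Nat) (r r' : List Bool)
    (hk : g[k]? = some r)
    (hr : r'.countP (fun x => x == false) + 1 = r.countP (fun x => x == false)) :
    pvFalseCount (g.set k r') + 1 = pvFalseCount g := by
  induction g generalizing k with
  | nil => simp at hk
  | cons x xs ih =>
    cases k with
    | zero =>
      simp only [List.getElem?_cons_zero, Option.some.injEq] at hk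
      subst hk
      simp only [List.set_cons_zero, pvFalseCount, List.map_cons, List.sum_cons]
      omega
    | succ k =>
      simp only [List.getElem?_cons_succ] at hk
      have := ih k hk
      simp only [List.set_cons_succ, pvFalseCount, List.map_cons, List.sum_cons] at this ⊢
      omega

lemma pvSetB_falseCount (g : List (List Bool)) (a b : Int)
    (h : pvGetB g a b = some false) :
    pvFalseCount (pvSetB g a b) + 1 = pvFalseCount g := by
  unfold pvGetB at h
  unfold pvSetB PySem.List.pySetD PySem.List.pySet? PySem.List.pyGetD PySem.List.pyGet? at *
  cases hk1 : PySem.List.pyIdx? g.length a with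
  | none => simp [hk1] at h
  | some k1 =>
    simp only [hk1, Option.bind_some, Option.map_some] at h ⊢
    cases hrow : g[k1]? with
    | none => simp [hrow] at h
    | some row =>
      simp only [hrow, Option.bind_some, Option.getD_some] at h ⊢
      cases hk2 : PySem.List.pyIdx? row.length b with
      | none => simp [hk2] at h
      | some k2 =>
        simp only [hk2, Option.bind_some, Option.map_some, Option.getD_some] at h ⊢
        exact pvFalseCount_set g k1 row _ hrow (pvCountP_set_true row k2 h)

lemma bfsDir_measure (g : List (List Bool)) (a b : Int) :
    5 * pvFalseCount (bfsDir g a b).1 + 5 * (bfsDir g a b).2.length ≤ 5 * pvFalseCount g := by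
  unfold bfsDir
  cases h : pvGetB g a b with
  | none => simp
  | some v =>
    by_cases hc : a ≠ -1 ∧ b ≠ -1 ∧ v = false
    · obtain ⟨_, _, rfl⟩ := hc
      have := pvSetB_falseCount g a b h
      simp_all
      omega
    · simp [hc]

-- the whole inner for-loop over the four directions (order d_x/d_y of A)
def pvProcessCur (g : List (List Bool)) (ci cj : Int) : List (List Bool) × List (Int × Int) :=
  ((bfsDir (bfsDir (bfsDir (bfsDir g (ci+1) cj).1 (ci-1) cj).1 ci (cj+1)).1 ci (cj-1)).1,
   (bfsDir g (ci+1) cj).2 ++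
   (bfsDir (bfsDir g (ci+1) cj).1 (ci-1) cj).2 ++
   (bfsDir (bfsDir (bfsDir g (ci+1) cj).1 (ci-1) cj).1 ci (cj+1)).2 ++
   (bfsDir (bfsDir (bfsDir (bfsDir g (ci+1) cj).1 (ci-1) cj).1 ci (cj+1)).1 ci (cj-1)).2)

lemma pvProcessCur_measure (g : List (List Bool)) (ci cj : Int) :
    5 * pvFalseCount (pvProcessCur g ci cj).1 + (pvProcessCur g ci cj).2.length
      ≤ 5 * pvFalseCount g := by
  have h1 := bfsDir_measure g (ci+1) cj
  have h2 := bfsDir_measure (bfsDir g (ci+1) cj).1 (ci-1) cj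
  have h3 := bfsDir_measure (bfsDir (bfsDir g (ci+1) cj).1 (ci-1) cj).1 ci (cj+1)
  have h4 := bfsDir_measure (bfsDir (bfsDir (bfsDir g (ci+1) cj).1 (ci-1) cj).1 ci (cj+1)).1 ci (cj-1)
  simp only [pvProcessCur, List.length_append]
  omega

-- A's bfs: while queue: popleft, scan the four directions, append marked cells
def bfs (g : List (List Bool)) (q : List (Int × Int)) : List (List Bool) :=
  match q with
  | [] => g
  | (ci, cj) :: rest => bfs (pvProcessCur g ci cj).1 (rest ++ (pvProcessCur g ci cj).2)
termination_by 5 * pvFalseCount g + q.length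
decreasing_by
  have := pvProcessCur_measure g ci cj
  simp only [List.length_append, List.length_cons]
  omega

-- body of A's scan: `if val is False: count += 1; bfs(...)`; `val` reads the
-- current (mutated) grid, so the grid is threaded through the fold
def scanCellA (st : List (List Bool) × Int) (i j : Int) : List (List Bool) × Int :=
  if (pvGetB st.1 i j).getD true = false then (bfs st.1 [(i, j)], st.2 + 1) else st

def scanRowA (input_map : List (List Int)) (st : List (List Bool) × Int) (i : Int) :
    List (List Bool) × Int :=
  (PySem.List.pyRange 0 (input_map.length : Int) 1).foldl (fun st j => scanCellA st i j) st

def count_map (input_map : List (List Int)) (rain_h : Int) : Int :=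
  ((PySem.List.pyRange 0 (input_map.length : Int) 1).foldl
    (fun st i => scanRowA input_map st i)
    (make_safe_map input_map rain_h, 0)).2

-- ===== PORT B =====
-- default for dict lookups (every looked-up key is present on admitted inputs)
def pvD0 : Int × Int := (0, 0)

-- [(i, j) for i in range(n) for j in range(n) if input_map[i][j] > rain_h]
def highList (im : List (List Int)) (rh : Int) : List (Int × Int) :=
  (PySem.List.pyRange 0 (im.length : Int) 1).flatMap (fun i =>
    ((PySem.List.pyRange 0 (im.length : Int) 1).filter
      (fun j => decide (pvGetI im i j > rh))).map (fun j => (i, j)))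

-- label = {p: p for p in high}
def initLabel (hi : List (Int × Int)) : PySem.Dict (Int × Int) (Int × Int) :=
  hi.foldl (fun d p => d.insert p p) PySem.Dict.empty

-- for p in high: if label[p] == r2: label[p] = r1
def relabel (hi : List (Int × Int)) (d : PySem.Dict (Int × Int) (Int × Int))
    (r2 r1 : Int × Int) : PySem.Dict (Int × Int) (Int × Int) :=
  hi.foldl (fun d p => if d.getD p pvD0 == r2 then d.insert p r1 else d) d

-- if q in label: r1, r2 = label[u], label[q]; if r1 != r2: merge class r2 into r1
def unionStep (hi : List (Int × Int)) (d : PySem.Dict (Int × Int) (Int × Int))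
    (u q : Int × Int) : PySem.Dict (Int × Int) (Int × Int) :=
  if d.contains q then
    if d.getD u pvD0 ≠ d.getD q pvD0 then relabel hi d (d.getD q pvD0) (d.getD u pvD0)
    else d
  else d

-- the inner loop over the two candidate edges (right, then down)
def processCell (hi : List (Int × Int)) (d : PySem.Dict (Int × Int) (Int × Int))
    (u : Int × Int) : PySem.Dict (Int × Int) (Int × Int) :=
  unionStep hi (unionStep hi d u (u.1, u.2 + 1)) u (u.1 + 1, u.2)

def count_map_alt (input_map : List (List Int)) (rain_h : Int) : Int :=
  PySem.Set.len (PySem.Set.ofList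
    ((highList input_map rain_h).foldl (processCell (highList input_map rain_h))
      (initLabel (highList input_map rain_h))).values)

-- ===== PRECONDITION & SPEC =====
-- Pre_ excludes exactly the inputs on which Python A raises IndexError:
-- a row shorter than the number of rows (make_safe_map reads an n×n square).
def Pre_count_map (input_map : List (List Int)) (rain_h : Int) : Prop :=
  ∀ row ∈ input_map, input_map.length ≤ row.length
instance (input_map : List (List Int)) (rain_h : Int) : Decidable (Pre_count_map input_map rain_h) := by
  unfold Pre_count_map; infer_instance

def pvWitness_count_map : List (List Int) × Int := ([[1, 2], [3, 0]], 1)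

def Spec_count_map (input_map : List (List Int)) (rain_h : Int) (out : Int) : Prop := out = count_map_alt input_map rain_h
instance (input_map : List (List Int)) (rain_h : Int) (out : Int) : Decidable (Spec_count_map input_map rain_h out) := by unfold Spec_count_map; infer_instance

-- ===== CLAIM (what is proved, stated in full; the proofs are below) =====
def Claim_equal_count_map : Prop := ∀ (input_map : List (List Int)) (rain_h : Int), Dom_count_map input_map rain_h → Pre_count_map input_map rain_h → Spec_count_map input_map rain_h (count_map input_map rain_h)

-- ===== LEMMAS AND PROOFS =====

-- ---------- abstract grid notions (proof-side only) ----------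

def pvAdj (p q : Int × Int) : Prop :=
  (q.1 = p.1 + 1 ∧ q.2 = p.2) ∨ (q.1 = p.1 - 1 ∧ q.2 = p.2) ∨
  (q.1 = p.1 ∧ q.2 = p.2 + 1) ∨ (q.1 = p.1 ∧ q.2 = p.2 - 1)

def pvSf (F : Int × Int → Prop) (p q : Int × Int) : Prop := pvAdj p q ∧ F q

def pvT (F : Int × Int → Prop) (c x : Int × Int) : Prop := Relation.TransGen (pvSf F) c x

def pvInB (n : Nat) (p : Int × Int) : Prop :=
  0 ≤ p.1 ∧ p.1 < (n : Int) ∧ 0 ≤ p.2 ∧ p.2 < (n : Int)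

def pvHi (im : List (List Int)) (rh : Int) (p : Int × Int) : Prop :=
  pvInB im.length p ∧ rh < pvGetI im p.1 p.2

def pvAdjH (im : List (List Int)) (rh : Int) (p q : Int × Int) : Prop :=
  pvAdj p q ∧ pvHi im rh p ∧ pvHi im rh q

def pvIso (im : List (List Int)) (rh : Int) (p : Int × Int) : Prop :=
  ¬ ∃ q, pvAdjH im rh p q

def pvWf (n : Nat) (g : List (List Bool)) : Prop :=
  g.length = n ∧ ∀ r ∈ g, r.length = n

def readC (g : List (List Bool)) (p : Int × Int) : Bool :=
  (g.getD p.1.toNat []).getD p.2.toNat true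

def pvFA (n : Nat) (g : List (List Bool)) (p : Int × Int) : Prop :=
  pvInB n p ∧ readC g p = false

lemma pvAdj_symm {p q : Int × Int} (h : pvAdj p q) : pvAdj q p := by
  unfold pvAdj at *; omega

lemma pvAdj_iff (c p : Int × Int) :
    pvAdj c p ↔ (p = (c.1 + 1, c.2) ∨ p = (c.1 - 1, c.2) ∨ p = (c.1, c.2 + 1) ∨ p = (c.1, c.2 - 1)) := by
  simp [pvAdj, Prod.ext_iff]

lemma pvAdjH_symm {im : List (List Int)} {rh : Int} {p q : Int × Int}
    (h : pvAdjH im rh p q) : pvAdjH im rh q p :=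
  ⟨pvAdj_symm h.1, h.2.2, h.2.1⟩

lemma pvT_mono {F G : Int × Int → Prop} (h : ∀ x, F x → G x) {c x : Int × Int} :
    pvT F c x → pvT G c x :=
  Relation.TransGen.mono (fun a b hab => ⟨hab.1, h b hab.2⟩)

lemma pvT_congr {F G : Int × Int → Prop} (h : ∀ x, F x ↔ G x) {c x : Int × Int} :
    pvT F c x ↔ pvT G c x :=
  ⟨pvT_mono (fun x => (h x).1), pvT_mono (fun x => (h x).2)⟩

lemma pvT_target {F : Int × Int → Prop} {c x : Int × Int} (h : pvT F c x) : F x := by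
  induction h with
  | single h => exact h.2
  | tail _ h _ => exact h.2

lemma pvT_first {F : Int × Int → Prop} {c x : Int × Int} (h : pvT F c x) :
    ∃ z, pvSf F c z := by
  induction h with
  | single h => exact ⟨_, h⟩
  | tail _ _ ih => exact ih

lemma pvT_surgery {F N : Int × Int → Prop} {c x : Int × Int} (h : pvT F c x) :
    ¬ N x →
    (pvT (fun z => F z ∧ ¬ N z) c x ∨ ∃ z, N z ∧ pvT (fun z => F z ∧ ¬ N z) z x) := by
  induction h with
  | @single y h =>
    intro hx
    exact Or.inl (Relation.TransGen.single ⟨h.1, h.2, hx⟩)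
  | @tail b y hcb hby ih =>
    intro hy
    by_cases hb : N b
    · exact Or.inr ⟨b, hb, Relation.TransGen.single ⟨hby.1, hby.2, hy⟩⟩
    · rcases ih hb with h' | ⟨z, hz, hz'⟩
      · exact Or.inl (h'.tail ⟨hby.1, hby.2, hy⟩)
      · exact Or.inr ⟨z, hz, hz'.tail ⟨hby.1, hby.2, hy⟩⟩

lemma pvR_step {F : Int × Int → Prop} (c : Int × Int) (rest : List (Int × Int)) (p : Int × Int) :
    (∃ y ∈ c :: rest, pvT F y p) ↔
      ((pvAdj c p ∧ F p) ∨
        ∃ y, (y ∈ rest ∨ (pvAdj c y ∧ F y)) ∧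
          pvT (fun z => F z ∧ ¬ (pvAdj c z ∧ F z)) y p) := by
  constructor
  · rintro ⟨y, hy, hT⟩
    by_cases hp : pvAdj c p ∧ F p
    · exact Or.inl hp
    · have hs := pvT_surgery (N := fun z => pvAdj c z ∧ F z) hT hp
      rcases List.mem_cons.mp hy with rfl | hyr
      · rcases hs with h' | ⟨z, hz, hz'⟩
        · exfalso
          obtain ⟨z, hz⟩ := pvT_first h'
          exact hz.2.2 ⟨hz.1, hz.2.1⟩
        · exact Or.inr ⟨z, Or.inr hz, hz'⟩
      · rcases hs with h' | ⟨z, hz, hz'⟩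
        · exact Or.inr ⟨y, Or.inl hyr, h'⟩
        · exact Or.inr ⟨z, Or.inr hz, hz'⟩
  · rintro (⟨hadj, hF⟩ | ⟨y, hy, hT⟩)
    · exact ⟨c, by simp, Relation.TransGen.single ⟨hadj, hF⟩⟩
    · rcases hy with hyr | ⟨hadj, hFy⟩
      · exact ⟨y, List.mem_cons_of_mem _ hyr, pvT_mono (fun z hz => hz.1) hT⟩
      · exact ⟨c, by simp,
          (Relation.TransGen.single ⟨hadj, hFy⟩).trans (pvT_mono (fun z hz => hz.1) hT)⟩

-- ---------- A-side grid bookkeeping ----------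

lemma pvWf_set {n : Nat} {g : List (List Bool)} (hw : pvWf n g) {p : Int × Int}
    (hp : pvInB n p) :
    pvWf n (g.set p.1.toNat ((g.getD p.1.toNat []).set p.2.toNat true)) := by
  obtain ⟨hgl, hrl⟩ := hw
  obtain ⟨h1, h2, h3, h4⟩ := hp
  refine ⟨by simp [hgl], ?_⟩
  intro r hr
  rcases List.mem_or_eq_of_mem_set hr with h | h
  · exact hrl r h
  · subst h
    rw [List.length_set]
    have hk : p.1.toNat < g.length := by omega
    rw [List.getD_eq_getElem?_getD, List.getElem?_eq_getElem hk, Option.getD_some]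
    exact hrl _ (List.getElem_mem hk)

lemma pvGetB_eq {n : Nat} {g : List (List Bool)} (hw : pvWf n g) {p : Int × Int}
    (hp : pvInB n p) : pvGetB g p.1 p.2 = some (readC g p) := by
  obtain ⟨hgl, hrl⟩ := hw
  obtain ⟨h1, h2, h3, h4⟩ := hp
  have hk1 : p.1.toNat < g.length := by omega
  unfold pvGetB readC
  rw [PySem.List.pyGet?_of_nonneg g h1, List.getElem?_eq_getElem hk1]
  simp only [Option.bind_some]
  have hrow : g[p.1.toNat].length = n := hrl _ (List.getElem_mem hk1)
  have hk2 : p.2.toNat < g[p.1.toNat].length := by omega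
  rw [PySem.List.pyGet?_of_nonneg _ h3, List.getElem?_eq_getElem hk2]
  congr 1
  rw [List.getD_eq_getElem?_getD (l := g), List.getElem?_eq_getElem hk1, Option.getD_some,
      List.getD_eq_getElem?_getD (l := g[p.1.toNat]), List.getElem?_eq_getElem hk2,
      Option.getD_some]

lemma pvSetB_eq {g : List (List Bool)} {a b : Int} (ha : 0 ≤ a) (hb : 0 ≤ b) :
    pvSetB g a b = g.set a.toNat ((g.getD a.toNat []).set b.toNat true) := by
  unfold pvSetB
  rw [PySem.List.pyGetD_of_nonneg _ _ ha, PySem.List.pySetD_of_nonneg _ _ hb,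
      PySem.List.pySetD_of_nonneg _ _ ha]

lemma readC_set {n : Nat} {g : List (List Bool)} (hw : pvWf n g) {p q : Int × Int}
    (hp : pvInB n p) (hq : pvInB n q) :
    readC (g.set p.1.toNat ((g.getD p.1.toNat []).set p.2.toNat true)) q
      = if q = p then true else readC g q := by
  obtain ⟨hgl, hrl⟩ := hw
  have hk1 : p.1.toNat < g.length := by obtain ⟨a, b, c, d⟩ := hp; omega
  have hrowl : (g.getD p.1.toNat []).length = n := by
    rw [List.getD_eq_getElem?_getD (l := g), List.getElem?_eq_getElem hk1, Option.getD_some]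
    exact hrl _ (List.getElem_mem hk1)
  have hk2 : p.2.toNat < (g.getD p.1.toNat []).length := by
    obtain ⟨a, b, c, d⟩ := hp; omega
  by_cases h1 : q.1.toNat = p.1.toNat
  · have hq1 : q.1 = p.1 := by
      obtain ⟨a, b, c, d⟩ := hp; obtain ⟨a', b', c', d'⟩ := hq; omega
    have hrow' : (g.set p.1.toNat ((g.getD p.1.toNat []).set p.2.toNat true)).getD q.1.toNat []
        = (g.getD p.1.toNat []).set p.2.toNat true := by
      rw [List.getD_eq_getElem?_getD
            (l := g.set p.1.toNat ((g.getD p.1.toNat []).set p.2.toNat true)),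
          h1, List.getElem?_set_self hk1, Option.getD_some]
    unfold readC
    rw [hrow']
    by_cases h2 : q.2.toNat = p.2.toNat
    · have hq2 : q.2 = p.2 := by
        obtain ⟨a, b, c, d⟩ := hp; obtain ⟨a', b', c', d'⟩ := hq; omega
      have hqp : q = p := Prod.ext hq1 hq2
      rw [if_pos hqp,
          List.getD_eq_getElem?_getD (l := (g.getD p.1.toNat []).set p.2.toNat true),
          h2, List.getElem?_set_self hk2, Option.getD_some]
    · have hqp : q ≠ p := fun h => h2 (by rw [h])
      rw [if_neg hqp,
          List.getD_eq_getElem?_getD (l := (g.getD p.1.toNat []).set p.2.toNat true),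
          List.getElem?_set_ne (by omega : p.2.toNat ≠ q.2.toNat),
          ← List.getD_eq_getElem?_getD, hq1]
  · have hqp : q ≠ p := fun h => h1 (by rw [h])
    have hrow' : (g.set p.1.toNat ((g.getD p.1.toNat []).set p.2.toNat true)).getD q.1.toNat []
        = g.getD q.1.toNat [] := by
      rw [List.getD_eq_getElem?_getD
            (l := g.set p.1.toNat ((g.getD p.1.toNat []).set p.2.toNat true)),
          List.getElem?_set_ne (by omega : p.1.toNat ≠ q.1.toNat),
          ← List.getD_eq_getElem?_getD]
    unfold readC
    rw [hrow', if_neg hqp]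

lemma pvWf_mk (im : List (List Int)) (rh : Int) : pvWf im.length (make_safe_map im rh) := by
  constructor
  · rw [make_safe_map, List.length_map, PySem.List.length_pyRange_one]
    omega
  · intro r hr
    rw [make_safe_map, List.mem_map] at hr
    obtain ⟨i, _, rfl⟩ := hr
    rw [List.length_map, PySem.List.length_pyRange_one]
    omega

lemma readC_mk (im : List (List Int)) (rh : Int) {p : Int × Int}
    (hp : pvInB im.length p) :
    readC (make_safe_map im rh) p = decide (pvGetI im p.1 p.2 ≤ rh) := by
  obtain ⟨h1, h2, h3, h4⟩ := hp
  have hk1' : p.1.toNat < (PySem.List.pyRange 0 (im.length : Int) 1).length := by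
    rw [PySem.List.length_pyRange_one]; omega
  have hk1 : p.1.toNat < (make_safe_map im rh).length := by
    rw [(pvWf_mk im rh).1]; omega
  have hval1 : (PySem.List.pyRange 0 (im.length : Int) 1)[p.1.toNat] = 0 + (p.1.toNat : Int) :=
    PySem.List.getElem_pyRange_one _ _ _ hk1'
  have hrow : (make_safe_map im rh)[p.1.toNat] =
      (PySem.List.pyRange 0 (im.length : Int) 1).map
        (fun col => decide (pvGetI im (0 + (p.1.toNat : Int)) col ≤ rh)) := by
    unfold make_safe_map
    rw [List.getElem_map, hval1]
  unfold readC
  rw [List.getD_eq_getElem?_getD (l := make_safe_map im rh), List.getElem?_eq_getElem hk1,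
      Option.getD_some, hrow]
  have hk2 : p.2.toNat < ((PySem.List.pyRange 0 (im.length : Int) 1).map
      (fun col => decide (pvGetI im (0 + (p.1.toNat : Int)) col ≤ rh))).length := by
    rw [List.length_map, PySem.List.length_pyRange_one]; omega
  have hk2' : p.2.toNat < (PySem.List.pyRange 0 (im.length : Int) 1).length := by
    rw [PySem.List.length_pyRange_one]; omega
  have hval2 : (PySem.List.pyRange 0 (im.length : Int) 1)[p.2.toNat] = 0 + (p.2.toNat : Int) :=
    PySem.List.getElem_pyRange_one _ _ _ hk2'
  rw [List.getD_eq_getElem?_getD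
        (l := (PySem.List.pyRange 0 (im.length : Int) 1).map
          (fun col => decide (pvGetI im (0 + (p.1.toNat : Int)) col ≤ rh))),
      List.getElem?_eq_getElem hk2, Option.getD_some, List.getElem_map, hval2]
  have e1 : (0 : Int) + (p.1.toNat : Int) = p.1 := by omega
  have e2 : (0 : Int) + (p.2.toNat : Int) = p.2 := by omega
  rw [e1, e2]

-- ---------- bfsDir / pvProcessCur specifications ----------

lemma bfsDir_none {g : List (List Bool)} {a b : Int} (h : pvGetB g a b = none) :
    bfsDir g a b = (g, []) := by
  unfold bfsDir; rw [h]

lemma bfsDir_some {g : List (List Bool)} {a b : Int} {v : Bool}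
    (h : pvGetB g a b = some v) :
    bfsDir g a b =
      if a ≠ -1 ∧ b ≠ -1 ∧ v = false then (pvSetB g a b, [(a, b)]) else (g, []) := by
  unfold bfsDir; rw [h]

lemma bfsDir_pos {n : Nat} {g : List (List Bool)} {a b : Int} (hw : pvWf n g)
    (hIn : pvInB n (a, b)) (hf : readC g (a, b) = false) :
    bfsDir g a b = (g.set a.toNat ((g.getD a.toNat []).set b.toNat true), [(a, b)]) := by
  have h := pvGetB_eq hw hIn
  rw [bfsDir_some h, if_pos, pvSetB_eq hIn.1 hIn.2.2.1]
  refine ⟨?_, ?_, hf⟩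
  · have := hIn.1; omega
  · have := hIn.2.2.1; omega

lemma bfsDir_neg {n : Nat} {g : List (List Bool)} {a b : Int} (hw : pvWf n g)
    (ha : -1 ≤ a) (ha' : a ≤ (n : Int)) (hb : -1 ≤ b) (hb' : b ≤ (n : Int))
    (h : ¬ (pvInB n (a, b) ∧ readC g (a, b) = false)) :
    bfsDir g a b = (g, []) := by
  by_cases hIn : pvInB n (a, b)
  · have hg := pvGetB_eq hw hIn
    rw [bfsDir_some hg, if_neg]
    rintro ⟨_, _, hv⟩
    exact h ⟨hIn, hv⟩
  · cases hgb : pvGetB g a b with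
    | none => exact bfsDir_none hgb
    | some v =>
      rw [bfsDir_some hgb, if_neg]
      rintro ⟨ha1, hb1, rfl⟩
      apply hIn
      unfold pvGetB at hgb
      cases hrow : PySem.List.pyGet? g a with
      | none => rw [hrow] at hgb; cases hgb
      | some row =>
        have hrin : ¬ (PySem.List.pyGet? g a = none) := by rw [hrow]; simp
        rw [PySem.List.pyGet?_eq_none_iff, not_not] at hrin
        obtain ⟨hra, hra'⟩ := hrin
        rw [hrow] at hgb
        simp only [Option.bind_some] at hgb
        have hbin : ¬ (PySem.List.pyGet? row b = none) := by rw [hgb]; simp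
        rw [PySem.List.pyGet?_eq_none_iff, not_not] at hbin
        obtain ⟨hrb, hrb'⟩ := hbin
        have hrl : row.length = n := hw.2 row (PySem.List.mem_of_pyGet?_eq_some g hrow)
        have hgl : g.length = n := hw.1
        rw [hgl] at hra hra'
        rw [hrl] at hrb hrb'
        exact ⟨by omega, by omega, by omega, by omega⟩

lemma pvDirStep {n : Nat} {g0 g' : List (List Bool)} {P : Int × Int → Prop}
    {t : Int × Int} (hw : pvWf n g')
    (hpt : ∀ p, pvInB n p → (readC g' p = false ↔ (readC g0 p = false ∧ ¬ P p)))
    (ht : ¬ P t)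
    (hb1 : -1 ≤ t.1) (hb2 : t.1 ≤ (n : Int)) (hb3 : -1 ≤ t.2) (hb4 : t.2 ≤ (n : Int)) :
    pvWf n (bfsDir g' t.1 t.2).1 ∧
    (∀ p, pvInB n p →
      (readC (bfsDir g' t.1 t.2).1 p = false ↔ (readC g0 p = false ∧ ¬ (P p ∨ p = t)))) ∧
    (∀ z, z ∈ (bfsDir g' t.1 t.2).2 ↔ (z = t ∧ pvInB n t ∧ readC g0 t = false)) := by
  by_cases hc : pvInB n t ∧ readC g' t = false
  · have hpos : bfsDir g' t.1 t.2 =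
        (g'.set t.1.toNat ((g'.getD t.1.toNat []).set t.2.toNat true), [(t.1, t.2)]) :=
      bfsDir_pos hw hc.1 hc.2
    rw [hpos]
    have hread0 : readC g0 t = false := ((hpt t hc.1).mp hc.2).1
    refine ⟨pvWf_set hw hc.1, ?_, ?_⟩
    · intro p hp
      rw [readC_set hw hc.1 hp]
      by_cases hpt' : p = t
      · subst hpt'
        rw [if_pos rfl]
        constructor
        · intro h; cases h
        · rintro ⟨_, h⟩; exact absurd (Or.inr rfl) h
      · rw [if_neg hpt', hpt p hp]
        constructor
        · rintro ⟨hh1, hh2⟩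
          refine ⟨hh1, ?_⟩
          rintro (h | h)
          · exact hh2 h
          · exact hpt' h
        · rintro ⟨hh1, hh2⟩
          exact ⟨hh1, fun h => hh2 (Or.inl h)⟩
    · intro z
      simp only [List.mem_singleton]
      constructor
      · rintro rfl; exact ⟨rfl, hc.1, hread0⟩
      · rintro ⟨rfl, _, _⟩; rfl
  · rw [bfsDir_neg hw hb1 hb2 hb3 hb4 hc]
    refine ⟨hw, ?_, ?_⟩
    · intro p hp
      rw [hpt p hp]
      by_cases hpt' : p = t
      · subst hpt'
        constructor
        · rintro ⟨hh1, hh2⟩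
          exact absurd ⟨hp, (hpt p hp).mpr ⟨hh1, hh2⟩⟩ hc
        · rintro ⟨hh1, hh2⟩
          exact absurd (Or.inr rfl) hh2
      · constructor
        · rintro ⟨hh1, hh2⟩
          refine ⟨hh1, ?_⟩
          rintro (h | h)
          · exact hh2 h
          · exact hpt' h
        · rintro ⟨hh1, hh2⟩
          exact ⟨hh1, fun h => hh2 (Or.inl h)⟩
    · intro z
      simp only [List.not_mem_nil, false_iff]
      rintro ⟨rfl, hIn, hr0⟩
      exact hc ⟨hIn, (hpt z hIn).mpr ⟨hr0, ht⟩⟩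

lemma pvProcessCur_spec {n : Nat} {g : List (List Bool)} (hw : pvWf n g)
    {c : Int × Int} (hc : pvInB n c) :
    pvWf n (pvProcessCur g c.1 c.2).1 ∧
    (∀ p, pvInB n p →
      (readC (pvProcessCur g c.1 c.2).1 p = false ↔ (readC g p = false ∧ ¬ pvAdj c p))) ∧
    (∀ z, z ∈ (pvProcessCur g c.1 c.2).2 ↔ (pvAdj c z ∧ pvInB n z ∧ readC g z = false)) := by
  obtain ⟨ci, cj⟩ := c
  obtain ⟨hc1, hc2, hc3, hc4⟩ := hc
  simp only at hc1 hc2 hc3 hc4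
  have s1 := pvDirStep (n := n) (g0 := g) (g' := g) (P := fun _ => False)
    (t := (ci + 1, cj)) hw (by intro p hp; simp) (by simp)
    (by show (-1 : Int) ≤ ci + 1; omega) (by show ci + 1 ≤ (n : Int); omega)
    (by show (-1 : Int) ≤ cj; omega) (by show cj ≤ (n : Int); omega)
  have s2 := pvDirStep (n := n) (g0 := g) (g' := (bfsDir g (ci + 1) cj).1)
    (P := fun p => p = (ci + 1, cj)) (t := (ci - 1, cj)) s1.1
    (by intro p hp; have := s1.2.1 p hp; tauto)
    (by intro hcon; rw [Prod.mk.injEq] at hcon; omega)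
    (by show (-1 : Int) ≤ ci - 1; omega) (by show ci - 1 ≤ (n : Int); omega)
    (by show (-1 : Int) ≤ cj; omega) (by show cj ≤ (n : Int); omega)
  have s3 := pvDirStep (n := n) (g0 := g)
    (g' := (bfsDir (bfsDir g (ci + 1) cj).1 (ci - 1) cj).1)
    (P := fun p => p = (ci + 1, cj) ∨ p = (ci - 1, cj)) (t := (ci, cj + 1)) s2.1
    (by intro p hp; have := s2.2.1 p hp; tauto)
    (by intro hcon; rcases hcon with h | h <;> simp only [Prod.mk.injEq] at h <;> omega)
    (by show (-1 : Int) ≤ ci; omega) (by show ci ≤ (n : Int); omega)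
    (by show (-1 : Int) ≤ cj + 1; omega) (by show cj + 1 ≤ (n : Int); omega)
  have s4 := pvDirStep (n := n) (g0 := g)
    (g' := (bfsDir (bfsDir (bfsDir g (ci + 1) cj).1 (ci - 1) cj).1 ci (cj + 1)).1)
    (P := fun p => (p = (ci + 1, cj) ∨ p = (ci - 1, cj)) ∨ p = (ci, cj + 1))
    (t := (ci, cj - 1)) s3.1
    (by intro p hp; have := s3.2.1 p hp; tauto)
    (by intro hcon; rcases hcon with (h | h) | h <;> simp only [Prod.mk.injEq] at h <;> omega)
    (by show (-1 : Int) ≤ ci; omega) (by show ci ≤ (n : Int); omega)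
    (by show (-1 : Int) ≤ cj - 1; omega) (by show cj - 1 ≤ (n : Int); omega)
  have hadj : ∀ z : Int × Int, pvAdj (ci, cj) z ↔
      (z = (ci + 1, cj) ∨ z = (ci - 1, cj) ∨ z = (ci, cj + 1) ∨ z = (ci, cj - 1)) := by
    intro z
    have := pvAdj_iff (ci, cj) z
    simpa using this
  refine ⟨s4.1, ?_, ?_⟩
  · intro p hp
    have h41 := s4.2.1 p hp
    rw [show (pvProcessCur g ci cj).1 =
        (bfsDir (bfsDir (bfsDir (bfsDir g (ci+1) cj).1 (ci-1) cj).1 ci (cj+1)).1 ci (cj-1)).1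
      from rfl]
    rw [h41, hadj p]
    tauto
  · intro z
    rw [show (pvProcessCur g ci cj).2 =
        (bfsDir g (ci+1) cj).2 ++
        (bfsDir (bfsDir g (ci+1) cj).1 (ci-1) cj).2 ++
        (bfsDir (bfsDir (bfsDir g (ci+1) cj).1 (ci-1) cj).1 ci (cj+1)).2 ++
        (bfsDir (bfsDir (bfsDir (bfsDir g (ci+1) cj).1 (ci-1) cj).1 ci (cj+1)).1 ci (cj-1)).2
      from rfl]
    simp only [List.mem_append]
    rw [s1.2.2 z, s2.2.2 z, s3.2.2 z, s4.2.2 z, hadj z]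
    constructor
    · rintro (((⟨rfl, hh1, hh2⟩ | ⟨rfl, hh1, hh2⟩) | ⟨rfl, hh1, hh2⟩) | ⟨rfl, hh1, hh2⟩)
      · exact ⟨Or.inl rfl, hh1, hh2⟩
      · exact ⟨Or.inr (Or.inl rfl), hh1, hh2⟩
      · exact ⟨Or.inr (Or.inr (Or.inl rfl)), hh1, hh2⟩
      · exact ⟨Or.inr (Or.inr (Or.inr rfl)), hh1, hh2⟩
    · rintro ⟨(rfl | rfl | rfl | rfl), hh1, hh2⟩
      · exact Or.inl (Or.inl (Or.inl ⟨rfl, hh1, hh2⟩))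
      · exact Or.inl (Or.inl (Or.inr ⟨rfl, hh1, hh2⟩))
      · exact Or.inl (Or.inr ⟨rfl, hh1, hh2⟩)
      · exact Or.inr ⟨rfl, hh1, hh2⟩

-- ---------- the bfs loop marks exactly the reachable false cells ----------

theorem bfs_spec {n : Nat} : ∀ (g : List (List Bool)) (q : List (Int × Int)),
    pvWf n g → (∀ cc ∈ q, pvInB n cc) →
    pvWf n (bfs g q) ∧
    (∀ p, pvInB n p →
      (readC (bfs g q) p = false ↔
        (readC g p = false ∧ ¬ ∃ y ∈ q, pvT (pvFA n g) y p))) := by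
  intro g q
  induction g, q using bfs.induct with
  | case1 g =>
    intro hw _
    simp only [bfs]
    exact ⟨hw, by intro p hp; simp⟩
  | case2 g ci cj rest ih =>
    intro hw hq
    have hc : pvInB n (ci, cj) := hq _ (by simp)
    have hps := pvProcessCur_spec hw hc
    have hq' : ∀ cc ∈ rest ++ (pvProcessCur g ci cj).2, pvInB n cc := by
      intro cc hcc
      rcases List.mem_append.mp hcc with h | h
      · exact hq _ (List.mem_cons_of_mem _ h)
      · exact ((hps.2.2 cc).mp h).2.1
    have IH := ih hps.1 hq'
    simp only [bfs]
    refine ⟨IH.1, ?_⟩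
    intro p hp
    rw [IH.2 p hp, hps.2.1 p hp]
    have hFA' : ∀ z, pvFA n (pvProcessCur g ci cj).1 z ↔
        (pvFA n g z ∧ ¬ (pvAdj (ci, cj) z ∧ pvFA n g z)) := by
      intro z
      unfold pvFA
      by_cases hz : pvInB n z
      · rw [hps.2.1 z hz]; tauto
      · tauto
    have hE : (∃ y ∈ rest ++ (pvProcessCur g ci cj).2,
          pvT (pvFA n (pvProcessCur g ci cj).1) y p) ↔
        (∃ y, (y ∈ rest ∨ (pvAdj (ci, cj) y ∧ pvFA n g y)) ∧
          pvT (fun z => pvFA n g z ∧ ¬ (pvAdj (ci, cj) z ∧ pvFA n g z)) y p) := by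
      constructor
      · rintro ⟨y, hy, hTy⟩
        rw [pvT_congr hFA'] at hTy
        rcases List.mem_append.mp hy with h | h
        · exact ⟨y, Or.inl h, hTy⟩
        · have hm := (hps.2.2 y).mp h
          exact ⟨y, Or.inr ⟨hm.1, hm.2.1, hm.2.2⟩, hTy⟩
      · rintro ⟨y, hy, hTy⟩
        rw [← pvT_congr hFA'] at hTy
        rcases hy with h | ⟨hh1, hh2⟩
        · exact ⟨y, List.mem_append.mpr (Or.inl h), hTy⟩
        · exact ⟨y, List.mem_append.mpr (Or.inr ((hps.2.2 y).mpr ⟨hh1, hh2.1, hh2.2⟩)), hTy⟩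
    rw [hE, pvR_step (F := pvFA n g) (ci, cj) rest p]
    constructor
    · rintro ⟨⟨hA, hadj⟩, hE1⟩
      refine ⟨hA, ?_⟩
      rintro (⟨hh1, _⟩ | h)
      · exact hadj hh1
      · exact hE1 h
    · rintro ⟨hA, hNE⟩
      exact ⟨⟨hA, fun hadj => hNE (Or.inl ⟨hadj, hp, hA⟩)⟩, fun h => hNE (Or.inr h)⟩

lemma pvT_not_iso {im : List (List Int)} {rh : Int} {F : Int × Int → Prop} {c x : Int × Int}
    (hF : ∀ z, F z → pvHi im rh z) (hc : pvHi im rh c) (h : pvT F c x) :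
    ¬ pvIso im rh x := by
  intro hiso
  cases h with
  | @single y hstep => exact hiso ⟨c, pvAdj_symm hstep.1, hF _ hstep.2, hc⟩
  | @tail b y h1 h2 => exact hiso ⟨b, pvAdj_symm h2.1, hF _ h2.2, hF _ (pvT_target h1)⟩

lemma pvT_drop_iso {im : List (List Int)} {rh : Int} {W I : Int × Int → Prop} {c x : Int × Int}
    (hW : ∀ z, W z → pvHi im rh z) (hI : ∀ z, I z → pvHi im rh z ∧ pvIso im rh z)
    (hc : pvHi im rh c) :
    pvT (fun z => W z ∨ I z) c x ↔ pvT W c x := by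
  constructor
  · intro h
    induction h with
    | @single y hstep =>
      rcases hstep.2 with h | h
      · exact Relation.TransGen.single ⟨hstep.1, h⟩
      · exact absurd ⟨c, pvAdj_symm hstep.1, (hI _ h).1, hc⟩ ((hI _ h).2)
    | @tail b y h1 h2 ih =>
      rcases h2.2 with h | h
      · exact ih.tail ⟨h2.1, h⟩
      · have hb : pvHi im rh b := hW _ (pvT_target ih)
        exact absurd ⟨b, pvAdj_symm h2.1, (hI _ h).1, hb⟩ ((hI _ h).2)
  · exact pvT_mono (fun z hz => Or.inl hz)

-- ---------- connectivity of high cells ----------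

def pvConn (im : List (List Int)) (rh : Int) (p q : Int × Int) : Prop :=
  Relation.ReflTransGen (pvAdjH im rh) p q

lemma pvConn_symm {im : List (List Int)} {rh : Int} {p q : Int × Int}
    (h : pvConn im rh p q) : pvConn im rh q p :=
  Relation.ReflTransGen.symmetric (fun _ _ hs => pvAdjH_symm hs) h

lemma pvConn_iso_eq {im : List (List Int)} {rh : Int} {p q : Int × Int}
    (hiso : pvIso im rh p) (h : pvConn im rh q p) : q = p := by
  rcases (Relation.ReflTransGen.cases_tail_iff _ _ _).mp h with h' | ⟨c, _, hstep⟩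
  · exact h'.symm
  · exact absurd ⟨c, pvAdjH_symm hstep⟩ hiso

lemma pvConn_iff_pvT {im : List (List Int)} {rh : Int} {c x : Int × Int}
    (hc : pvHi im rh c) :
    pvConn im rh c x ↔ (x = c ∨ pvT (fun z => pvHi im rh z) c x) := by
  constructor
  · intro h
    induction h with
    | refl => exact Or.inl rfl
    | @tail b y hcb hstep ih =>
      rcases ih with rfl | hT
      · exact Or.inr (Relation.TransGen.single ⟨hstep.1, hstep.2.2⟩)
      · exact Or.inr (hT.tail ⟨hstep.1, hstep.2.2⟩)
  · rintro (rfl | hT)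
    · exact Relation.ReflTransGen.refl
    · induction hT with
      | @single y h => exact Relation.ReflTransGen.single ⟨h.1, hc, h.2⟩
      | @tail b y hT h ih => exact ih.tail ⟨h.1, pvT_target hT, h.2⟩

-- ---------- the scan prefix, its visited region, its high cells ----------

def pvScanned (i j : Int) (p : Int × Int) : Prop := p.1 < i ∨ (p.1 = i ∧ p.2 < j)

def pvScannedB (i j : Int) (p : Int × Int) : Bool :=
  decide (p.1 < i ∨ (p.1 = i ∧ p.2 < j))

lemma pvScannedB_iff (i j : Int) (p : Int × Int) :
    pvScannedB i j p = true ↔ pvScanned i j p := by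
  unfold pvScannedB pvScanned; simp

lemma pvScanned_succ (i j : Int) (p : Int × Int) :
    pvScanned i (j + 1) p ↔ (pvScanned i j p ∨ p = (i, j)) := by
  obtain ⟨p1, p2⟩ := p
  simp only [pvScanned, Prod.mk.injEq]
  omega

-- cells already swallowed by a bfs started at a scanned cell
def pvVs (im : List (List Int)) (rh : Int) (i j : Int) (x : Int × Int) : Prop :=
  ∃ q, pvScanned i j q ∧ pvHi im rh q ∧ pvConn im rh q x

lemma pvVs_closed {im : List (List Int)} {rh : Int} {i j : Int} {x y : Int × Int}
    (h : pvVs im rh i j x) (hc : pvConn im rh x y) : pvVs im rh i j y := by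
  obtain ⟨q, hs, hh, hq⟩ := h
  exact ⟨q, hs, hh, hq.trans hc⟩

lemma pvVs_succ {im : List (List Int)} {rh : Int} {i j : Int} (x : Int × Int) :
    pvVs im rh i (j + 1) x ↔ (pvVs im rh i j x ∨ (pvHi im rh (i, j) ∧ pvConn im rh (i, j) x)) := by
  constructor
  · rintro ⟨q, hs, hh, hc⟩
    rcases (pvScanned_succ i j q).mp hs with h | rfl
    · exact Or.inl ⟨q, h, hh, hc⟩
    · exact Or.inr ⟨hh, hc⟩
  · rintro (⟨q, hs, hh, hc⟩ | ⟨hh, hc⟩)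
    · exact ⟨q, (pvScanned_succ i j q).mpr (Or.inl hs), hh, hc⟩
    · exact ⟨(i, j), (pvScanned_succ i j (i, j)).mpr (Or.inr rfl), hh, hc⟩

-- the high cells of the grid, in scan order
lemma mem_highList {im : List (List Int)} {rh : Int} {p : Int × Int} :
    p ∈ highList im rh ↔ pvHi im rh p := by
  obtain ⟨a, b⟩ := p
  unfold highList pvHi pvInB
  simp only [List.mem_flatMap, List.mem_map, List.mem_filter,
    PySem.List.mem_pyRange_one, decide_eq_true_eq, Prod.mk.injEq]
  constructor
  · rintro ⟨i, hi, j, ⟨⟨hj1, hj2⟩, hgt⟩, rfl, rfl⟩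
    exact ⟨⟨by omega, by omega, by omega, by omega⟩, hgt⟩
  · rintro ⟨⟨h1, h2, h3, h4⟩, hgt⟩
    exact ⟨a, ⟨by omega, by omega⟩, b, ⟨⟨by omega, by omega⟩, hgt⟩, rfl, rfl⟩

def pvSH (im : List (List Int)) (rh : Int) (i j : Int) : List (Int × Int) :=
  (highList im rh).filter (pvScannedB i j)

lemma mem_imageSH {im : List (List Int)} {rh : Int} {f : Int × Int → Int × Int}
    {i j : Int} {y : Int × Int} :
    y ∈ ((pvSH im rh i j).map f).toFinset ↔
      ∃ p, pvHi im rh p ∧ pvScanned i j p ∧ f p = y := by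
  simp only [List.mem_toFinset, List.mem_map, pvSH, List.mem_filter,
    mem_highList, pvScannedB_iff]
  constructor
  · rintro ⟨p, ⟨hh, hs⟩, hf⟩; exact ⟨p, hh, hs, hf⟩
  · rintro ⟨p, hh, hs, hf⟩; exact ⟨p, ⟨hh, hs⟩, hf⟩

-- drop already-visited cells from a reachability chain out of an unvisited start
lemma pvT_unvisited_iff {im : List (List Int)} {rh : Int} {i j : Int} {c : Int × Int}
    (hc : pvHi im rh c) (hcv : ¬ pvVs im rh i j c) (x : Int × Int) :
    pvT (fun z => pvHi im rh z ∧ ¬ pvVs im rh i j z) c x ↔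
      pvT (fun z => pvHi im rh z) c x := by
  constructor
  · exact pvT_mono (fun z hz => hz.1)
  · intro h
    induction h with
    | @single y h1 =>
      have hcy : pvConn im rh c y := Relation.ReflTransGen.single ⟨h1.1, hc, h1.2⟩
      exact Relation.TransGen.single
        ⟨h1.1, h1.2, fun hv => hcv (pvVs_closed hv (pvConn_symm hcy))⟩
    | @tail b y hT h1 ih =>
      have hcy : pvConn im rh c y :=
        (pvConn_iff_pvT hc).mpr (Or.inr (hT.tail h1))
      exact ih.tail ⟨h1.1, h1.2, fun hv => hcv (pvVs_closed hv (pvConn_symm hcy))⟩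

lemma pvT_W_self {im : List (List Int)} {rh : Int} {i j : Int} {c : Int × Int}
    (hc : pvHi im rh c) (hcv : ¬ pvVs im rh i j c) :
    pvT (fun z => pvHi im rh z ∧ ¬ pvVs im rh i j z) c c ↔ ¬ pvIso im rh c := by
  constructor
  · exact pvT_not_iso (fun z hz => hz.1) hc
  · intro hiso
    unfold pvIso at hiso
    rw [not_not] at hiso
    obtain ⟨q, hq⟩ := hiso
    have hqv : ¬ pvVs im rh i j q := fun hv =>
      hcv (pvVs_closed hv (Relation.ReflTransGen.single (pvAdjH_symm hq)))
    exact Relation.TransGen.tail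
      (Relation.TransGen.single ⟨hq.1, hq.2.2, hqv⟩)
      ⟨pvAdj_symm hq.1, hc, hcv⟩

-- ---------- the A-scan invariant ----------
-- f is any labeling constant exactly on connected components of high cells;
-- A's running count is the number of distinct f-values over the scanned high cells.
def pvInvA (im : List (List Int)) (rh : Int) (f : Int × Int → Int × Int) (i j : Int)
    (st : List (List Bool) × Int) : Prop :=
  pvWf im.length st.1 ∧
  (∀ p, pvInB im.length p →
    (readC st.1 p = false ↔
      ((pvHi im rh p ∧ ¬ pvVs im rh i j p) ∨
       (pvHi im rh p ∧ pvIso im rh p ∧ pvVs im rh i j p)))) ∧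
  st.2 = ((((pvSH im rh i j).map f).toFinset.card : Int))

lemma pvLogicA (A V I T C Hc : Prop) (hHc : Hc) (h1 : T → C) (h3 : T → ¬I)
    (h5 : C → ¬I → T) :
    ((A ∧ ¬V ∨ A ∧ I ∧ V) ∧ ¬T) ↔ (A ∧ ¬(V ∨ Hc ∧ C) ∨ A ∧ I ∧ (V ∨ Hc ∧ C)) := by
  tauto

lemma pvStepA {im : List (List Int)} {rh : Int} {f : Int × Int → Int × Int} {i j : Int}
    {st : List (List Bool) × Int}
    (hf : ∀ p q, pvHi im rh p → pvHi im rh q → (f p = f q ↔ pvConn im rh p q))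
    (hi0 : 0 ≤ i) (hi1 : i < (im.length : Int)) (hj0 : 0 ≤ j) (hj1 : j < (im.length : Int))
    (hInv : pvInvA im rh f i j st) : pvInvA im rh f i (j + 1) (scanCellA st i j) := by
  obtain ⟨hw, h3, hcnt⟩ := hInv
  have hcIn : pvInB im.length (i, j) := ⟨hi0, hi1, hj0, hj1⟩
  have hSc : ¬ pvScanned i j (i, j) := by unfold pvScanned; simp only; omega
  have hIsoNotV : pvIso im rh (i, j) → ¬ pvVs im rh i j (i, j) := by
    rintro hiso ⟨q, hs, hh, hcq⟩
    rw [pvConn_iso_eq hiso hcq] at hs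
    exact hSc hs
  have hAguard : ((pvGetB st.1 i j).getD true = false) ↔
      (pvHi im rh (i, j) ∧ ¬ pvVs im rh i j (i, j)) := by
    rw [pvGetB_eq hw hcIn, Option.getD_some, h3 _ hcIn]
    constructor
    · rintro (h | ⟨hh, hiso, hv⟩)
      · exact h
      · exact absurd hv (hIsoNotV hiso)
    · exact Or.inl
  by_cases hc : pvHi im rh (i, j) ∧ ¬ pvVs im rh i j (i, j)
  case neg =>
    unfold scanCellA
    rw [if_neg (fun h => hc (hAguard.mp h))]
    have hVeq : ∀ x, pvVs im rh i (j + 1) x ↔ pvVs im rh i j x := by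
      intro x
      rw [pvVs_succ]
      constructor
      · rintro (h | ⟨hhi, hcx⟩)
        · exact h
        · have hvc : pvVs im rh i j (i, j) := by
            by_contra hnv; exact hc ⟨hhi, hnv⟩
          exact pvVs_closed hvc hcx
      · exact Or.inl
    refine ⟨hw, ?_, ?_⟩
    · intro p hp
      rw [hVeq p]
      exact h3 p hp
    · have hset : ((pvSH im rh i (j + 1)).map f).toFinset
          = ((pvSH im rh i j).map f).toFinset := by
        ext y
        rw [mem_imageSH, mem_imageSH]
        constructor
        · rintro ⟨p, hhp, hsp, hfp⟩
          rcases (pvScanned_succ i j p).mp hsp with h | rfl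
          · exact ⟨p, hhp, h, hfp⟩
          · have hvc : pvVs im rh i j (i, j) := by
              by_contra hnv; exact hc ⟨hhp, hnv⟩
            obtain ⟨q, hs, hh, hconn⟩ := hvc
            exact ⟨q, hh, hs, by rw [(hf q (i, j) hh hhp).mpr hconn, hfp]⟩
        · rintro ⟨p, hhp, hsp, hfp⟩
          exact ⟨p, hhp, (pvScanned_succ i j p).mpr (Or.inl hsp), hfp⟩
      rw [hcnt, hset]
  case pos =>
    obtain ⟨hchi, hcv⟩ := hc
    unfold scanCellA
    rw [if_pos (hAguard.mpr ⟨hchi, hcv⟩)]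
    have hbfs := bfs_spec (n := im.length) st.1 [(i, j)] hw
      (by intro cc hcc; rw [List.mem_singleton] at hcc; subst hcc; exact hcIn)
    refine ⟨hbfs.1, ?_, ?_⟩
    · intro p hp
      have hg' : readC (bfs st.1 [(i, j)]) p = false ↔
          (readC st.1 p = false ∧ ¬ pvT (pvFA im.length st.1) (i, j) p) := by
        rw [hbfs.2 p hp]
        constructor
        · rintro ⟨a, b⟩; exact ⟨a, fun hT => b ⟨(i, j), by simp, hT⟩⟩
        · rintro ⟨a, b⟩
          refine ⟨a, ?_⟩
          rintro ⟨y, hy, hT⟩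
          rw [List.mem_singleton] at hy; subst hy
          exact b hT
      have hHiInB : ∀ z, pvHi im rh z → pvInB im.length z := fun z hz => hz.1
      have hco : ∀ z, pvFA im.length st.1 z ↔
          ((pvHi im rh z ∧ ¬ pvVs im rh i j z) ∨
           (pvHi im rh z ∧ pvIso im rh z ∧ pvVs im rh i j z)) := by
        intro z
        unfold pvFA
        by_cases hz : pvInB im.length z
        · rw [h3 z hz]; tauto
        · constructor
          · rintro ⟨h', _⟩; exact absurd h' hz
          · intro h
            exfalso
            rcases h with ⟨h', _⟩ | ⟨h', _, _⟩ <;> exact hz (hHiInB _ h')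
      have hTW : pvT (pvFA im.length st.1) (i, j) p ↔
          pvT (fun z => pvHi im rh z ∧ ¬ pvVs im rh i j z) (i, j) p := by
        rw [pvT_congr hco]
        exact pvT_drop_iso (fun z hz => hz.1) (fun z hz => ⟨hz.1, hz.2.1⟩) hchi
      rw [hg', h3 p hp, hTW]
      have hF1 : pvT (fun z => pvHi im rh z ∧ ¬ pvVs im rh i j z) (i, j) p →
          pvConn im rh (i, j) p := fun h =>
        (pvConn_iff_pvT hchi).mpr (Or.inr (pvT_mono (fun z hz => hz.1) h))
      have hF3 : pvT (fun z => pvHi im rh z ∧ ¬ pvVs im rh i j z) (i, j) p →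
          ¬ pvIso im rh p := pvT_not_iso (fun z hz => hz.1) hchi
      have hF4 := pvT_W_self hchi hcv
      have hF5 : pvConn im rh (i, j) p → ¬ pvIso im rh p → p ≠ (i, j) →
          pvT (fun z => pvHi im rh z ∧ ¬ pvVs im rh i j z) (i, j) p := by
        intro hcp hniso hne
        rcases (pvConn_iff_pvT hchi).mp hcp with h | h
        · exact absurd h hne
        · exact (pvT_unvisited_iff hchi hcv p).mpr h
      rw [pvVs_succ p]
      by_cases hcp : p = (i, j)
      · subst hcp
        exact pvLogicA _ _ _ _ _ _ hchi hF1 hF3 (fun _ hni => hF4.mpr hni)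
      · exact pvLogicA _ _ _ _ _ _ hchi hF1 hF3 (fun hcc hni => hF5 hcc hni hcp)
    · have hnotmem : f (i, j) ∉ ((pvSH im rh i j).map f).toFinset := by
        rw [mem_imageSH]
        rintro ⟨p, hhp, hsp, hfp⟩
        exact hcv ⟨p, hsp, hhp, (hf p (i, j) hhp hchi).mp hfp⟩
      have hset : ((pvSH im rh i (j + 1)).map f).toFinset
          = insert (f (i, j)) ((pvSH im rh i j).map f).toFinset := by
        ext y
        rw [Finset.mem_insert, mem_imageSH, mem_imageSH]
        constructor
        · rintro ⟨p, hhp, hsp, hfp⟩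
          rcases (pvScanned_succ i j p).mp hsp with h | rfl
          · exact Or.inr ⟨p, hhp, h, hfp⟩
          · exact Or.inl hfp.symm
        · rintro (h | ⟨p, hhp, hsp, hfp⟩)
          · exact ⟨(i, j), hchi, (pvScanned_succ i j (i, j)).mpr (Or.inr rfl), h.symm⟩
          · exact ⟨p, hhp, (pvScanned_succ i j p).mpr (Or.inl hsp), hfp⟩
      show st.2 + 1 = _
      rw [hcnt, hset, Finset.card_insert_of_notMem hnotmem]
      push_cast
      ring

lemma pvInvA_init (im : List (List Int)) (rh : Int) (f : Int × Int → Int × Int) :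
    pvInvA im rh f 0 0 (make_safe_map im rh, 0) := by
  have hnV : ∀ x, ¬ pvVs im rh 0 0 x := by
    rintro x ⟨q, hs, hh, _⟩
    obtain ⟨b1, b2, b3, b4⟩ := hh.1
    unfold pvScanned at hs
    omega
  refine ⟨pvWf_mk im rh, ?_, ?_⟩
  · intro p hp
    show readC (make_safe_map im rh) p = false ↔ _
    rw [readC_mk im rh hp]
    simp only [decide_eq_false_iff_not, not_le]
    constructor
    · intro h
      exact Or.inl ⟨⟨hp, h⟩, hnV p⟩
    · rintro (⟨⟨_, h⟩, _⟩ | ⟨⟨_, h⟩, _, hv⟩)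
      · exact h
      · exact absurd hv (hnV p)
  · show (0 : Int) = _
    have hnil : pvSH im rh 0 0 = [] := by
      apply List.filter_eq_nil_iff.mpr
      intro p hp
      rw [mem_highList] at hp
      obtain ⟨b1, b2, b3, b4⟩ := hp.1
      simp only [pvScannedB, decide_eq_true_eq]
      omega
    rw [hnil]
    simp

lemma pvScanA_cells {im : List (List Int)} {rh : Int} {f : Int × Int → Int × Int} {i : Int}
    (hf : ∀ p q, pvHi im rh p → pvHi im rh q → (f p = f q ↔ pvConn im rh p q))
    (hi0 : 0 ≤ i) (hi1 : i < (im.length : Int)) :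
    ∀ (k : Nat) (j : Int), j = (im.length : Int) - k → 0 ≤ j →
    ∀ st, pvInvA im rh f i j st →
    pvInvA im rh f i (im.length : Int)
      ((PySem.List.pyRange j (im.length : Int) 1).foldl (fun st j' => scanCellA st i j') st) := by
  intro k
  induction k with
  | zero =>
    intro j hj hj0 st hInv
    have hjn : j = (im.length : Int) := by omega
    subst hjn
    rw [PySem.List.pyRange_one_eq_nil (le_refl _)]
    simpa using hInv
  | succ k ih =>
    intro j hj hj0 st hInv
    have hjn : j < (im.length : Int) := by omega
    rw [PySem.List.pyRange_one_cons hjn]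
    simp only [List.foldl_cons]
    exact ih (j + 1) (by omega) (by omega) _ (pvStepA hf hi0 hi1 hj0 hjn hInv)

lemma pvInvA_next_row {im : List (List Int)} {rh : Int} {f : Int × Int → Int × Int} {i : Int}
    {st : List (List Bool) × Int}
    (h : pvInvA im rh f i (im.length : Int) st) : pvInvA im rh f (i + 1) 0 st := by
  obtain ⟨hw, h3, hcnt⟩ := h
  have hs' : ∀ q : Int × Int, pvHi im rh q →
      (pvScanned i (im.length : Int) q ↔ pvScanned (i + 1) 0 q) := by
    intro q hq
    obtain ⟨b1, b2, b3, b4⟩ := hq.1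
    unfold pvScanned
    omega
  have hV : ∀ x, pvVs im rh i (im.length : Int) x ↔ pvVs im rh (i + 1) 0 x := by
    intro x
    constructor
    · rintro ⟨q, hs, hh, hc⟩; exact ⟨q, (hs' q hh).mp hs, hh, hc⟩
    · rintro ⟨q, hs, hh, hc⟩; exact ⟨q, (hs' q hh).mpr hs, hh, hc⟩
  have hSH : pvSH im rh i (im.length : Int) = pvSH im rh (i + 1) 0 := by
    apply List.filter_congr
    intro p hp
    rw [mem_highList] at hp
    have := hs' p hp
    simp only [pvScannedB]
    rw [decide_eq_decide]
    unfold pvScanned at this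
    exact this
  refine ⟨hw, ?_, ?_⟩
  · intro p hp
    rw [← hV p]
    exact h3 p hp
  · rw [← hSH]
    exact hcnt

lemma pvScanA_rows {im : List (List Int)} {rh : Int} {f : Int × Int → Int × Int}
    (hf : ∀ p q, pvHi im rh p → pvHi im rh q → (f p = f q ↔ pvConn im rh p q)) :
    ∀ (k : Nat) (i : Int), i = (im.length : Int) - k → 0 ≤ i →
    ∀ st, pvInvA im rh f i 0 st →
    pvInvA im rh f (im.length : Int) 0
      ((PySem.List.pyRange i (im.length : Int) 1).foldl (fun st i' => scanRowA im st i') st) := by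
  intro k
  induction k with
  | zero =>
    intro i hi hi0 st hInv
    have hin : i = (im.length : Int) := by omega
    subst hin
    rw [PySem.List.pyRange_one_eq_nil (le_refl _)]
    simpa using hInv
  | succ k ih =>
    intro i hi hi0 st hInv
    have hin : i < (im.length : Int) := by omega
    rw [PySem.List.pyRange_one_cons hin]
    simp only [List.foldl_cons]
    have hrow := pvScanA_cells hf hi0 hin im.length 0 (by omega) (le_refl 0) st hInv
    have hA : scanRowA im st i =
        (PySem.List.pyRange 0 (im.length : Int) 1).foldl (fun st j' => scanCellA st i j') st := rfl
    rw [hA]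
    exact ih (i + 1) (by omega) (by omega) _ (pvInvA_next_row hrow)

lemma pvA_count {im : List (List Int)} {rh : Int} {f : Int × Int → Int × Int}
    (hf : ∀ p q, pvHi im rh p → pvHi im rh q → (f p = f q ↔ pvConn im rh p q)) :
    count_map im rh = ((((highList im rh).map f).toFinset.card : Int)) := by
  have h := pvScanA_rows hf im.length 0 (by omega) (le_refl 0) _ (pvInvA_init im rh f)
  have hSH : pvSH im rh (im.length : Int) 0 = highList im rh := by
    apply List.filter_eq_self.mpr
    intro p hp
    rw [mem_highList] at hp
    obtain ⟨b1, b2, b3, b4⟩ := hp.1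
    simp only [pvScannedB, decide_eq_true_eq]
    omega
  have := h.2.2
  rw [hSH] at this
  exact this

-- ---------- B side: the label dict ----------

-- keys invariant: the key list stays exactly the distinct high cells
def pvKInv (hi : List (Int × Int)) (d : PySem.Dict (Int × Int) (Int × Int)) : Prop :=
  d.keys = PySem.Set.ofList hi

-- soundness: equal labels only on connected high cells
def pvSound (im : List (List Int)) (rh : Int)
    (d : PySem.Dict (Int × Int) (Int × Int)) : Prop :=
  ∀ p q, p ∈ highList im rh → q ∈ highList im rh →
    d.getD p pvD0 = d.getD q pvD0 → pvConn im rh p q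

lemma pvInit_getD (hi : List (Int × Int)) (x : Int × Int) :
    ∀ d : PySem.Dict (Int × Int) (Int × Int),
      ((hi.foldl (fun d p => d.insert p p) d).getD x pvD0)
      = if x ∈ hi then x else d.getD x pvD0 := by
  induction hi with
  | nil => intro d; simp
  | cons a l ih =>
    intro d
    simp only [List.foldl_cons]
    rw [ih]
    by_cases hxl : x ∈ l
    · simp [hxl, List.mem_cons]
    · by_cases hxa : x = a
      · subst hxa
        simp [hxl]
      · simp [hxl, hxa, List.mem_cons, PySem.Dict.getD_insert]

lemma initLabel_getD {hi : List (Int × Int)} {p : Int × Int} (hp : p ∈ hi) :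
    (initLabel hi).getD p pvD0 = p := by
  unfold initLabel
  rw [pvInit_getD hi p PySem.Dict.empty, if_pos hp]

lemma initLabel_keys (hi : List (Int × Int)) : pvKInv hi (initLabel hi) := by
  unfold pvKInv initLabel
  rw [PySem.Dict.keys_foldl_insert hi (fun _ x => x) PySem.Dict.empty,
    PySem.Dict.keys_empty, PySem.Set.update_nil_left]

lemma initLabel_sound (im : List (List Int)) (rh : Int) :
    pvSound im rh (initLabel (highList im rh)) := by
  intro p q hp hq heq
  rw [initLabel_getD hp, initLabel_getD hq] at heq
  rw [heq]
  exact Relation.ReflTransGen.refl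

-- the relabel loop rewrites exactly the keys carrying the old label
lemma relabel_getD (hi : List (Int × Int)) (r2 r1 : Int × Int) (hne : r1 ≠ r2)
    (x : Int × Int) :
    ∀ d : PySem.Dict (Int × Int) (Int × Int), (relabel hi d r2 r1).getD x pvD0
      = if x ∈ hi ∧ d.getD x pvD0 = r2 then r1 else d.getD x pvD0 := by
  unfold relabel
  induction hi with
  | nil => intro d; simp
  | cons a l ih =>
    intro d
    simp only [List.foldl_cons]
    rw [ih]
    by_cases hxa : x = a
    · subst hxa
      by_cases hda : d.getD x pvD0 = r2
      · have hstep : ((if d.getD x pvD0 == r2 then d.insert x r1 else d)).getD x pvD0 = r1 := by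
          rw [if_pos (by simp [hda]), PySem.Dict.getD_insert]
          simp
        rw [hstep]
        have hc1 : ¬ (x ∈ l ∧ r1 = r2) := fun h => hne h.2
        rw [if_neg hc1, if_pos ⟨List.mem_cons_self, hda⟩]
      · have hstep : ((if d.getD x pvD0 == r2 then d.insert x r1 else d)).getD x pvD0
            = d.getD x pvD0 := by
          rw [if_neg (by simp [hda])]
        rw [hstep]
        rw [if_neg (fun h => hda h.2), if_neg (fun h => hda h.2)]
    · have hstep : ((if d.getD a pvD0 == r2 then d.insert a r1 else d)).getD x pvD0
          = d.getD x pvD0 := by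
        by_cases hda : d.getD a pvD0 == r2
        · rw [if_pos hda, PySem.Dict.getD_insert, if_neg hxa]
        · rw [if_neg hda]
      rw [hstep]
      have hmem : (x ∈ a :: l) ↔ x ∈ l := by
        rw [List.mem_cons]
        exact ⟨fun h => h.resolve_left hxa, Or.inr⟩
      by_cases hxl : x ∈ l <;> by_cases hdx : d.getD x pvD0 = r2 <;>
        simp [hxl, hdx, hmem]

lemma relabel_keys (hi : List (Int × Int)) (r2 r1 : Int × Int) :
    ∀ d : PySem.Dict (Int × Int) (Int × Int),
      (∀ p ∈ hi, d.contains p = true) → (relabel hi d r2 r1).keys = d.keys := by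
  unfold relabel
  induction hi with
  | nil => intro d _; simp
  | cons a l ih =>
    intro d hsub
    simp only [List.foldl_cons]
    have hca : d.contains a = true := hsub a List.mem_cons_self
    have hstepk : ((if d.getD a pvD0 == r2 then d.insert a r1 else d)).keys = d.keys := by
      by_cases hda : d.getD a pvD0 == r2
      · rw [if_pos hda, PySem.Dict.keys_insert_of_contains d r1 hca]
      · rw [if_neg hda]
    rw [ih _ ?_, hstepk]
    intro p hp
    rw [PySem.Dict.contains_iff_mem_keys, hstepk, ← PySem.Dict.contains_iff_mem_keys]
    exact hsub p (List.mem_cons_of_mem _ hp)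

lemma unionStep_keys {hi : List (Int × Int)} {d : PySem.Dict (Int × Int) (Int × Int)}
    {u q : Int × Int} (hK : pvKInv hi d) : pvKInv hi (unionStep hi d u q) := by
  unfold unionStep
  split_ifs with h1 h2
  · unfold pvKInv
    rw [relabel_keys hi _ _ d ?_]
    · exact hK
    · intro p hp
      rw [PySem.Dict.contains_iff_mem_keys, hK, PySem.Set.mem_ofList]
      exact hp
  · exact hK
  · exact hK

lemma unionStep_getD_congr {hi : List (Int × Int)} {d : PySem.Dict (Int × Int) (Int × Int)}
    {u q a b : Int × Int} (ha : a ∈ hi) (hb : b ∈ hi)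
    (hab : d.getD a pvD0 = d.getD b pvD0) :
    (unionStep hi d u q).getD a pvD0 = (unionStep hi d u q).getD b pvD0 := by
  unfold unionStep
  split_ifs with h1 h2
  · rw [relabel_getD hi _ _ h2 a d, relabel_getD hi _ _ h2 b d, hab]
    by_cases hc : d.getD b pvD0 = d.getD q pvD0
    · rw [if_pos ⟨ha, hc⟩, if_pos ⟨hb, hc⟩]
    · rw [if_neg (fun h => hc h.2), if_neg (fun h => hc h.2)]
  · exact hab
  · exact hab

lemma unionStep_done {hi : List (Int × Int)} {d : PySem.Dict (Int × Int) (Int × Int)}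
    {u q : Int × Int} (hK : pvKInv hi d) (hqH : q ∈ hi) :
    (unionStep hi d u q).getD u pvD0 = (unionStep hi d u q).getD q pvD0 := by
  have hcq : d.contains q = true := by
    rw [PySem.Dict.contains_iff_mem_keys, hK, PySem.Set.mem_ofList]
    exact hqH
  unfold unionStep
  rw [if_pos hcq]
  by_cases h2 : d.getD u pvD0 ≠ d.getD q pvD0
  · rw [if_pos h2, relabel_getD hi _ _ h2 u d, relabel_getD hi _ _ h2 q d,
      if_neg (fun h => h2 h.2), if_pos ⟨hqH, rfl⟩]
  · rw [if_neg h2]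
    exact not_not.mp h2

lemma unionStep_sound {im : List (List Int)} {rh : Int}
    {d : PySem.Dict (Int × Int) (Int × Int)} {u q : Int × Int}
    (hS : pvSound im rh d) (hK : pvKInv (highList im rh) d)
    (hu : u ∈ highList im rh)
    (hadj : q ∈ highList im rh → pvConn im rh u q) :
    pvSound im rh (unionStep (highList im rh) d u q) := by
  unfold unionStep
  split_ifs with h1 h2
  · have hqH : q ∈ highList im rh := by
      rw [← PySem.Set.mem_ofList, ← hK, ← PySem.Dict.contains_iff_mem_keys]
      exact h1
    have hConnUQ : pvConn im rh u q := hadj hqH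
    intro p p' hp hp' heq
    rw [relabel_getD _ _ _ h2 p d, relabel_getD _ _ _ h2 p' d] at heq
    by_cases c1 : d.getD p pvD0 = d.getD q pvD0 <;>
      by_cases c2 : d.getD p' pvD0 = d.getD q pvD0
    · exact (hS p q hp hqH c1).trans (pvConn_symm (hS p' q hp' hqH c2))
    · rw [if_pos ⟨hp, c1⟩, if_neg (fun h => c2 h.2)] at heq
      have hpq : pvConn im rh p q := hS p q hp hqH c1
      have hp'u : pvConn im rh p' u := hS p' u hp' hu heq.symm
      exact (hpq.trans (pvConn_symm hConnUQ)).trans (pvConn_symm hp'u)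
    · rw [if_neg (fun h => c1 h.2), if_pos ⟨hp', c2⟩] at heq
      have hpu : pvConn im rh p u := hS p u hp hu heq
      have hp'q : pvConn im rh p' q := hS p' q hp' hqH c2
      exact (hpu.trans hConnUQ).trans (pvConn_symm hp'q)
    · rw [if_neg (fun h => c1 h.2), if_neg (fun h => c2 h.2)] at heq
      exact hS p p' hp hp' heq
  · exact hS
  · exact hS

lemma processCell_keys {hi : List (Int × Int)} {d : PySem.Dict (Int × Int) (Int × Int)}
    {u : Int × Int} (hK : pvKInv hi d) : pvKInv hi (processCell hi d u) :=
  unionStep_keys (unionStep_keys hK)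

lemma processCell_getD_congr {hi : List (Int × Int)} {d : PySem.Dict (Int × Int) (Int × Int)}
    {u a b : Int × Int} (ha : a ∈ hi) (hb : b ∈ hi)
    (hab : d.getD a pvD0 = d.getD b pvD0) :
    (processCell hi d u).getD a pvD0 = (processCell hi d u).getD b pvD0 :=
  unionStep_getD_congr ha hb (unionStep_getD_congr ha hb hab)

lemma processCell_sound {im : List (List Int)} {rh : Int}
    {d : PySem.Dict (Int × Int) (Int × Int)} {u : Int × Int}
    (hS : pvSound im rh d) (hK : pvKInv (highList im rh) d)
    (hu : u ∈ highList im rh) :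
    pvSound im rh (processCell (highList im rh) d u) := by
  have hHiu : pvHi im rh u := mem_highList.mp hu
  apply unionStep_sound (unionStep_sound hS hK hu ?_) (unionStep_keys hK) hu ?_
  · intro hq
    exact Relation.ReflTransGen.single
      ⟨Or.inr (Or.inr (Or.inl ⟨rfl, rfl⟩)), hHiu, mem_highList.mp hq⟩
  · intro hq
    exact Relation.ReflTransGen.single
      ⟨Or.inl ⟨rfl, rfl⟩, hHiu, mem_highList.mp hq⟩

lemma processCell_done {hi : List (Int × Int)} {d : PySem.Dict (Int × Int) (Int × Int)}
    {u : Int × Int} (hK : pvKInv hi d) (hu : u ∈ hi) (q : Int × Int)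
    (hq : q = (u.1, u.2 + 1) ∨ q = (u.1 + 1, u.2)) (hqH : q ∈ hi) :
    (processCell hi d u).getD u pvD0 = (processCell hi d u).getD q pvD0 := by
  rcases hq with rfl | rfl
  · exact unionStep_getD_congr hu hqH (unionStep_done hK hqH)
  · exact unionStep_done (unionStep_keys hK) hqH

lemma pvFoldB (im : List (List Int)) (rh : Int) :
    ∀ (l : List (Int × Int)) (d : PySem.Dict (Int × Int) (Int × Int)),
    (∀ x ∈ l, x ∈ highList im rh) →
    pvKInv (highList im rh) d → pvSound im rh d →
    pvKInv (highList im rh) (l.foldl (processCell (highList im rh)) d) ∧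
    pvSound im rh (l.foldl (processCell (highList im rh)) d) ∧
    (∀ a b, a ∈ highList im rh → b ∈ highList im rh →
      d.getD a pvD0 = d.getD b pvD0 →
      (l.foldl (processCell (highList im rh)) d).getD a pvD0
        = (l.foldl (processCell (highList im rh)) d).getD b pvD0) ∧
    (∀ u ∈ l, ∀ q, (q = (u.1, u.2 + 1) ∨ q = (u.1 + 1, u.2)) → q ∈ highList im rh →
      (l.foldl (processCell (highList im rh)) d).getD u pvD0
        = (l.foldl (processCell (highList im rh)) d).getD q pvD0) := by
  intro l
  induction l with
  | nil =>
    intro d _ hK hS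
    exact ⟨hK, hS, fun a b _ _ hab => hab, by simp⟩
  | cons a l ih =>
    intro d hl hK hS
    simp only [List.foldl_cons]
    have haH : a ∈ highList im rh := hl a List.mem_cons_self
    have hK1 := processCell_keys (d := d) (u := a) hK
    have hS1 := processCell_sound hS hK haH
    have IH := ih (processCell (highList im rh) d a)
      (fun x hx => hl x (List.mem_cons_of_mem _ hx)) hK1 hS1
    refine ⟨IH.1, IH.2.1, ?_, ?_⟩
    · intro a' b' ha' hb' hab
      exact IH.2.2.1 a' b' ha' hb' (processCell_getD_congr ha' hb' hab)
    · intro u hu q hq hqH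
      rcases List.mem_cons.mp hu with rfl | hu'
      · exact IH.2.2.1 u q haH hqH (processCell_done hK haH q hq hqH)
      · exact IH.2.2.2 u hu' q hq hqH

-- the final label map is constant on each connected component …
lemma pvB_adj_eq {im : List (List Int)} {rh : Int} {p q : Int × Int}
    (h : pvAdjH im rh p q) :
    ((highList im rh).foldl (processCell (highList im rh))
        (initLabel (highList im rh))).getD p pvD0
      = ((highList im rh).foldl (processCell (highList im rh))
        (initLabel (highList im rh))).getD q pvD0 := by
  have hpH : p ∈ highList im rh := mem_highList.mpr h.2.1
  have hqH : q ∈ highList im rh := mem_highList.mpr h.2.2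
  have hF := pvFoldB im rh (highList im rh) (initLabel (highList im rh))
    (fun x hx => hx) (initLabel_keys _) (initLabel_sound im rh)
  have hdone := hF.2.2.2
  rcases (pvAdj_iff p q).mp h.1 with rfl | rfl | rfl | rfl
  · exact hdone p hpH _ (Or.inr rfl) hqH
  · have hp' : p = ((p.1 - 1, p.2).1 + 1, (p.1 - 1, p.2).2) := by
      simp
    exact (hdone (p.1 - 1, p.2) hqH p (Or.inr hp') hpH).symm
  · exact hdone p hpH _ (Or.inl rfl) hqH
  · have hp' : p = ((p.1, p.2 - 1).1, (p.1, p.2 - 1).2 + 1) := by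
      simp
    exact (hdone (p.1, p.2 - 1) hqH p (Or.inl hp') hpH).symm

lemma pvB_conn_eq {im : List (List Int)} {rh : Int} {p q : Int × Int}
    (h : pvConn im rh p q) :
    ((highList im rh).foldl (processCell (highList im rh))
        (initLabel (highList im rh))).getD p pvD0
      = ((highList im rh).foldl (processCell (highList im rh))
        (initLabel (highList im rh))).getD q pvD0 := by
  induction h with
  | refl => rfl
  | tail hcb hstep ih => exact ih.trans (pvB_adj_eq hstep)

-- … and equal labels occur only inside one component
lemma pvB_label_iff {im : List (List Int)} {rh : Int} (p q : Int × Int)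
    (hp : pvHi im rh p) (hq : pvHi im rh q) :
    ((fun x => ((highList im rh).foldl (processCell (highList im rh))
        (initLabel (highList im rh))).getD x pvD0) p
      = (fun x => ((highList im rh).foldl (processCell (highList im rh))
        (initLabel (highList im rh))).getD x pvD0) q)
      ↔ pvConn im rh p q := by
  constructor
  · intro h
    have hF := pvFoldB im rh (highList im rh) (initLabel (highList im rh))
      (fun x hx => hx) (initLabel_keys _) (initLabel_sound im rh)
    exact hF.2.1 p q (mem_highList.mpr hp) (mem_highList.mpr hq) h
  · exact pvB_conn_eq

lemma pvLen_ofList (l : List (Int × Int)) :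
    PySem.Set.len (PySem.Set.ofList l) = ((l.toFinset.card : Int)) := by
  have h1 : (PySem.Set.ofList l).toFinset = l.toFinset := by
    ext y
    simp [PySem.Set.mem_ofList]
  have h2 := List.toFinset_card_of_nodup (PySem.Set.nodup_ofList l)
  show ((PySem.Set.ofList l).length : Int) = _
  rw [← h2, h1]

lemma pvB_count (im : List (List Int)) (rh : Int) :
    count_map_alt im rh =
      ((((highList im rh).map (fun x =>
        ((highList im rh).foldl (processCell (highList im rh))
          (initLabel (highList im rh))).getD x pvD0)).toFinset.card : Int)) := by
  unfold count_map_alt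
  have hF := pvFoldB im rh (highList im rh) (initLabel (highList im rh))
    (fun x hx => hx) (initLabel_keys _) (initLabel_sound im rh)
  have hkeys : ((highList im rh).foldl (processCell (highList im rh))
      (initLabel (highList im rh))).keys = PySem.Set.ofList (highList im rh) := hF.1
  have hnd : ((highList im rh).foldl (processCell (highList im rh))
      (initLabel (highList im rh))).keys.Nodup := by
    rw [hkeys]; exact PySem.Set.nodup_ofList _
  rw [PySem.Dict.values_eq_map_keys _ hnd pvD0, hkeys, pvLen_ofList]
  congr 1
  apply Finset.card_bij (fun y _ => y) ?_ ?_ ?_ |>.symm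
  · intro y hy
    simp only [List.mem_toFinset, List.mem_map] at hy ⊢
    obtain ⟨x, hx, rfl⟩ := hy
    exact ⟨x, (PySem.Set.mem_ofList _ _).mpr hx, rfl⟩
  · intro y _ y' _ h
    exact h
  · intro y hy
    simp only [List.mem_toFinset, List.mem_map] at hy ⊢
    obtain ⟨x, hx, rfl⟩ := hy
    exact ⟨_, ⟨x, (PySem.Set.mem_ofList _ _).mp hx, rfl⟩, rfl⟩

-- ===== VERDICT (by name: the statement is the Claim_ definition above) =====
theorem count_map_spec : Claim_equal_count_map := by
  unfold Claim_equal_count_map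
  intro input_map rain_h _ _
  unfold Spec_count_map
  rw [pvA_count (pvB_label_iff (im := input_map) (rh := rain_h)), pvB_count]
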